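-- pv_equiv track=rewrite | github.com/christianebacani/Roadmap | Coding Challenges using Python and SQL/Code Wars Python Solved Problems/7 Kyu/interlocking_binary_pairs.py | interlockable
-- ===== SOURCE A (Python) =====
-- def convert_to_binary(number: int) -> str:
--     binary = ''
--
--     while number > 0:
--         remainder = number % 2
--         binary = str(remainder) + binary
--         number = number // 2
--
--     return binary
--
-- def interlockable(a: int, b: int) -> bool:
--     binary_a = convert_to_binary(a)
--     binary_b = convert_to_binary(b)
--
--     if len(binary_a) > len(binary_b):
--         binary_b = (len(binary_a) - len(binary_b)) * '0' + binary_b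
--
--     elif len(binary_b) > len(binary_a):
--         binary_a = (len(binary_b) - len(binary_a)) * '0' + binary_a
--
--     else:
--         pass
--
--     total_bits = len(binary_a)
--
--     for i in range(total_bits):
--         if binary_a[i] == binary_b[i] and binary_a[i] == '1':
--             return False
--
--     return True
-- ===== SOURCE B (Python) =====
-- def interlockable(a: int, b: int) -> bool:
--     while a > 0 and b > 0:
--         if a % 2 == 1 and b % 2 == 1:
--             return False
--         a //= 2
--         b //= 2
--     return True
-- ===== Notes on version B (the rewrite author's own statement) =====
-- stated objective: simpler
-- what changed: Replaces binary-string conversion, zero-padding and an indexed comparison scan with a single interleaved arithmetic loop that tests the low bits of both numbers and halves them until one is exhausted.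
import Mathlib
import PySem

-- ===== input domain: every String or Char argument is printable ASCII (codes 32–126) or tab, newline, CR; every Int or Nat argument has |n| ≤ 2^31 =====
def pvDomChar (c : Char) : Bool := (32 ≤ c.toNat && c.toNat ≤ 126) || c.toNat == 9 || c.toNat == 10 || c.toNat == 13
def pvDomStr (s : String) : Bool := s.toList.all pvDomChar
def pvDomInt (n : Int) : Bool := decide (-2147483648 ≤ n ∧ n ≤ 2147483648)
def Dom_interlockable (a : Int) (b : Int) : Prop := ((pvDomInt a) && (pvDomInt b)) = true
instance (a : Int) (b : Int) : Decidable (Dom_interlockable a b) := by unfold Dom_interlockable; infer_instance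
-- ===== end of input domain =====

-- B replaces A's string conversion + padding + indexed scan by one interleaved arithmetic loop over the bits (objective: simpler).


-- ===== PORT A =====
-- the while-loop of convert_to_binary, with its string accumulator (as List Char)
def pvConvertLoop (number : Int) (binary : List Char) : List Char :=
  if 0 < number then
    pvConvertLoop (PySem.Int.floordiv number 2)
      (PySem.Int.toChars (PySem.Int.mod number 2) ++ binary)
  else binary
termination_by number.toNat
decreasing_by rw [PySem.Int.floordiv_eq_ediv_of_pos (by omega : (0:Int) < 2)]; omega

-- the 'for i in range(total_bits)' scan with its early return False;
-- every index range produces is in bounds here, so pyGetD with a default is exact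
def pvCheckLoop (sa sb : List Char) : List Int → Bool
  | [] => true
  | i :: rest =>
      if PySem.List.pyGetD sa i '0' = PySem.List.pyGetD sb i '0' ∧
         PySem.List.pyGetD sa i '0' = '1' then false
      else pvCheckLoop sa sb rest

def interlockable (a : Int) (b : Int) : Bool :=
  let binary_a := pvConvertLoop a []
  let binary_b := pvConvertLoop b []
  let binary_b' := if binary_a.length > binary_b.length then
      List.replicate (binary_a.length - binary_b.length) '0' ++ binary_b else binary_b
  let binary_a' := if binary_b.length > binary_a.length then
      List.replicate (binary_b.length - binary_a.length) '0' ++ binary_a else binary_a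
  pvCheckLoop binary_a' binary_b' (PySem.List.pyRange 0 (binary_a'.length : Int) 1)

-- ===== PORT B =====
def pvAltLoop (a : Int) (b : Int) : Bool :=
  if 0 < a ∧ 0 < b then
    if PySem.Int.mod a 2 = 1 ∧ PySem.Int.mod b 2 = 1 then false
    else pvAltLoop (PySem.Int.floordiv a 2) (PySem.Int.floordiv b 2)
  else true
termination_by a.toNat
decreasing_by rw [PySem.Int.floordiv_eq_ediv_of_pos (by omega : (0:Int) < 2)]; omega

def interlockable_alt (a : Int) (b : Int) : Bool := pvAltLoop a b

-- ===== PRECONDITION & SPEC =====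
def Spec_interlockable (a : Int) (b : Int) (out : Bool) : Prop := out = interlockable_alt a b
instance (a : Int) (b : Int) (out : Bool) : Decidable (Spec_interlockable a b out) := by unfold Spec_interlockable; infer_instance

-- ===== CLAIM (what is proved, stated in full; the proofs are below) =====
def Claim_equal_interlockable : Prop := ∀ (a : Int) (b : Int), Dom_interlockable a b → Spec_interlockable a b (interlockable a b)

-- ===== LEMMAS AND PROOFS =====

-- non-accumulator form of convert_to_binary
def pvConvert (n : Int) : List Char :=
  if 0 < n then pvConvert (PySem.Int.floordiv n 2) ++ PySem.Int.toChars (PySem.Int.mod n 2)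
  else []
termination_by n.toNat
decreasing_by rw [PySem.Int.floordiv_eq_ediv_of_pos (by omega : (0:Int) < 2)]; omega

theorem pvConvertLoop_eq (n : Int) (acc : List Char) :
    pvConvertLoop n acc = pvConvert n ++ acc := by
  induction n, acc using pvConvertLoop.induct with
  | case1 n acc h ih =>
      rw [pvConvertLoop, pvConvert, if_pos h, if_pos h, ih, List.append_assoc]
  | case2 n acc h =>
      rw [pvConvertLoop, pvConvert, if_neg h, if_neg h, List.nil_append]

def pvDigit (n : Int) : Char := if PySem.Int.mod n 2 = 1 then '1' else '0'

theorem pvMod2 (n : Int) : PySem.Int.mod n 2 = 0 ∨ PySem.Int.mod n 2 = 1 := by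
  rw [PySem.Int.mod_eq_emod_of_pos (by omega : (0:Int) < 2)]; omega

theorem pvToChars_mod2 (n : Int) :
    PySem.Int.toChars (PySem.Int.mod n 2) = [pvDigit n] := by
  rcases pvMod2 n with h | h <;> rw [pvDigit, h] <;> simp <;> decide

theorem pvConvert_pos (n : Int) (h : 0 < n) :
    pvConvert n = pvConvert (PySem.Int.floordiv n 2) ++ [pvDigit n] := by
  rw [pvConvert, if_pos h, pvToChars_mod2]

theorem pvConvert_nonpos (n : Int) (h : ¬ 0 < n) : pvConvert n = [] := by
  rw [pvConvert, if_neg h]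

theorem pvFloordiv_nonpos (n : Int) (h : ¬ 0 < n) :
    ¬ 0 < PySem.Int.floordiv n 2 := by
  rw [PySem.Int.floordiv_eq_ediv_of_pos (by omega : (0:Int) < 2)]; omega

theorem pvConvert_len (n : Int) (h : 0 < n) :
    (pvConvert n).length = (pvConvert (PySem.Int.floordiv n 2)).length + 1 := by
  rw [pvConvert_pos n h]; simp

theorem pvConvert_half_len (n : Int) :
    (pvConvert (PySem.Int.floordiv n 2)).length = (pvConvert n).length - 1 := by
  by_cases h : 0 < n
  · rw [pvConvert_len n h]; omega
  · rw [pvConvert_nonpos _ (pvFloordiv_nonpos n h), pvConvert_nonpos n h]; rfl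

-- the scan splits over list append (the early return distributes as &&)
theorem pvCheckLoop_append (sa sb : List Char) (is js : List Int) :
    pvCheckLoop sa sb (is ++ js) = (pvCheckLoop sa sb is && pvCheckLoop sa sb js) := by
  induction is with
  | nil => simp [pvCheckLoop]
  | cons i rest ih =>
      by_cases h : PySem.List.pyGetD sa i '0' = PySem.List.pyGetD sb i '0' ∧
          PySem.List.pyGetD sa i '0' = '1'
      · simp only [List.cons_append, pvCheckLoop, if_pos h, Bool.false_and]
      · simp only [List.cons_append, pvCheckLoop, if_neg h, ih]

theorem pvCheckLoop_congr (sa sb sa' sb' : List Char) (is : List Int)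
    (h : ∀ i ∈ is, PySem.List.pyGetD sa i '0' = PySem.List.pyGetD sa' i '0' ∧
                   PySem.List.pyGetD sb i '0' = PySem.List.pyGetD sb' i '0') :
    pvCheckLoop sa sb is = pvCheckLoop sa' sb' is := by
  induction is with
  | nil => rfl
  | cons i rest ih =>
      have hi := h i (by simp)
      rw [pvCheckLoop, pvCheckLoop, hi.1, hi.2,
        ih (fun j hj => h j (by simp [hj]))]

theorem pvCheckLoop_nil (sa sb : List Char) : pvCheckLoop sa sb [] = true := rfl

-- padded form of A's scan
def pvPad (s : List Char) (L : Nat) : List Char := List.replicate (L - s.length) '0' ++ s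

theorem pvPad_len (s : List Char) (L : Nat) (h : s.length ≤ L) : (pvPad s L).length = L := by
  simp [pvPad]; omega

def pvCore (a b : Int) (L : Nat) : Bool :=
  pvCheckLoop (pvPad (pvConvert a) L) (pvPad (pvConvert b) L) (PySem.List.pyRange 0 (L : Int) 1)

-- index at the length of the front of a concat
theorem pvGetD_concat (xs : List Char) (x : Char) :
    PySem.List.pyGetD (xs ++ [x]) ((xs.length : Nat) : Int) '0' = x := by
  rw [PySem.List.pyGetD_of_nonneg _ '0' (by omega)]
  simp

-- the last padded char is the low bit (or '0' when n contributes no bits)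
theorem pvPad_last (n : Int) (L : Nat) (h : (pvConvert n).length ≤ L + 1) :
    PySem.List.pyGetD (pvPad (pvConvert n) (L + 1)) (L : Int) '0'
      = (if 0 < n then pvDigit n else '0') := by
  by_cases hn : 0 < n
  · rw [if_pos hn]
    have e1 : pvPad (pvConvert n) (L + 1)
        = (List.replicate (L - (pvConvert (PySem.Int.floordiv n 2)).length) '0' ++
            pvConvert (PySem.Int.floordiv n 2)) ++ [pvDigit n] := by
      rw [pvPad, pvConvert_pos n hn, ← List.append_assoc]
      simp [Nat.succ_sub_succ]
    have hfl : (List.replicate (L - (pvConvert (PySem.Int.floordiv n 2)).length) '0' ++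
        pvConvert (PySem.Int.floordiv n 2)).length = L := by
      have := pvConvert_len n hn
      rw [List.length_append, List.length_replicate]
      omega
    rw [e1]
    have hc := pvGetD_concat (List.replicate (L - (pvConvert (PySem.Int.floordiv n 2)).length) '0' ++
        pvConvert (PySem.Int.floordiv n 2)) (pvDigit n)
    rw [hfl] at hc
    exact hc
  · rw [if_neg hn, pvConvert_nonpos n hn, pvPad]
    rw [PySem.List.pyGetD_of_nonneg _ '0' (by omega)]
    simp

-- dropping the last index leaves the padded form of n // 2
theorem pvPad_take (n : Int) (L : Nat) (h : (pvConvert n).length ≤ L + 1) :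
    (pvPad (pvConvert n) (L + 1)).take L = pvPad (pvConvert (PySem.Int.floordiv n 2)) L := by
  by_cases hn : 0 < n
  · have e1 : pvPad (pvConvert n) (L + 1)
        = (List.replicate (L - (pvConvert (PySem.Int.floordiv n 2)).length) '0' ++
            pvConvert (PySem.Int.floordiv n 2)) ++ [pvDigit n] := by
      rw [pvPad, pvConvert_pos n hn, ← List.append_assoc]
      simp [Nat.succ_sub_succ]
    have hfl : (List.replicate (L - (pvConvert (PySem.Int.floordiv n 2)).length) '0' ++
        pvConvert (PySem.Int.floordiv n 2)).length = L := by
      have := pvConvert_len n hn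
      rw [List.length_append, List.length_replicate]
      omega
    rw [e1, List.take_left' hfl, pvPad]
  · rw [pvPad, pvConvert_nonpos n hn, pvPad,
      pvConvert_nonpos _ (pvFloordiv_nonpos n hn)]
    simp [List.take_replicate]

theorem pvGetD_take (s : List Char) (L : Nat) (i : Int)
    (h0 : 0 ≤ i) (h1 : i < (L : Int)) (hs : L ≤ s.length) :
    PySem.List.pyGetD s i '0' = PySem.List.pyGetD (s.take L) i '0' := by
  rw [PySem.List.pyGetD_eq_getElem _ '0' h0 (by omega),
      PySem.List.pyGetD_eq_getElem _ '0' h0 (by simp [List.length_take]; omega)]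
  rw [List.getElem_take]

theorem pvCore_eq : ∀ (L : Nat) (a b : Int),
    max (pvConvert a).length (pvConvert b).length = L → pvCore a b L = pvAltLoop a b := by
  intro L
  induction L with
  | zero =>
      intro a b hL
      have ha : ¬ 0 < a := fun h => by have := pvConvert_len a h; omega
      have hb : ¬ 0 < b := fun h => by have := pvConvert_len b h; omega
      rw [pvCore, show ((0:Nat):Int) = 0 from rfl, PySem.List.pyRange_one_eq_nil (le_refl 0),
        pvCheckLoop, pvAltLoop, if_neg (by tauto)]
  | succ L ih =>
      intro a b hL
      have hla : (pvConvert a).length ≤ L + 1 := by omega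
      have hlb : (pvConvert b).length ≤ L + 1 := by omega
      have hmax : max (pvConvert (PySem.Int.floordiv a 2)).length
          (pvConvert (PySem.Int.floordiv b 2)).length = L := by
        rw [pvConvert_half_len a, pvConvert_half_len b]
        rw [Nat.max_def] at hL ⊢
        split_ifs at hL ⊢ <;> omega
      have hfront : pvCheckLoop (pvPad (pvConvert a) (L+1)) (pvPad (pvConvert b) (L+1))
          (PySem.List.pyRange 0 (L : Int) 1)
          = pvCore (PySem.Int.floordiv a 2) (PySem.Int.floordiv b 2) L := by
        rw [pvCore,
          pvCheckLoop_congr _ _ ((pvPad (pvConvert a) (L+1)).take L)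
            ((pvPad (pvConvert b) (L+1)).take L) _ ?_,
          pvPad_take a L hla, pvPad_take b L hlb]
        intro i hi
        rw [PySem.List.mem_pyRange_one] at hi
        exact ⟨pvGetD_take _ L i hi.1 hi.2 (by rw [pvPad_len _ _ hla]; omega),
               pvGetD_take _ L i hi.1 hi.2 (by rw [pvPad_len _ _ hlb]; omega)⟩
      rw [pvCore, show (((L+1:Nat)):Int) = (L : Int) + 1 by push_cast; ring,
        PySem.List.pyRange_one_succ_right (by omega : (0:Int) ≤ (L:Int)),
        pvCheckLoop_append, hfront, ih _ _ hmax,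
        pvCheckLoop, pvPad_last a L hla, pvPad_last b L hlb]
      conv_rhs => rw [pvAltLoop]
      by_cases hab : 0 < a ∧ 0 < b
      · rw [if_pos hab.1, if_pos hab.2, if_pos hab]
        by_cases hodd : PySem.Int.mod a 2 = 1 ∧ PySem.Int.mod b 2 = 1
        · have hda : pvDigit a = '1' := by rw [pvDigit, if_pos hodd.1]
          have hdb : pvDigit b = '1' := by rw [pvDigit, if_pos hodd.2]
          rw [if_pos hodd, hda, hdb, if_pos ⟨rfl, rfl⟩, Bool.and_false]
        · rw [if_neg hodd]
          rcases Decidable.not_and_iff_or_not.mp hodd with h | h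
          · have hda : pvDigit a = '0' := by rw [pvDigit, if_neg h]
            rw [hda, if_neg (fun hc => absurd hc.2 (by decide)), pvCheckLoop_nil,
              Bool.and_true]
          · have hdb : pvDigit b = '0' := by rw [pvDigit, if_neg h]
            rw [hdb, if_neg (fun hc => absurd (hc.1.symm.trans hc.2) (by decide)),
              pvCheckLoop_nil, Bool.and_true]
      · rw [if_neg hab]
        rcases Decidable.not_and_iff_or_not.mp hab with h | h
        · have hhead : pvAltLoop (PySem.Int.floordiv a 2) (PySem.Int.floordiv b 2) = true := by
            rw [pvAltLoop, if_neg (fun hc => (pvFloordiv_nonpos a h) hc.1)]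
          rw [hhead, Bool.true_and, if_neg h,
            if_neg (fun hc => absurd hc.2 (by decide : ¬('0' : Char) = '1')), pvCheckLoop_nil]
        · have hhead : pvAltLoop (PySem.Int.floordiv a 2) (PySem.Int.floordiv b 2) = true := by
            rw [pvAltLoop, if_neg (fun hc => (pvFloordiv_nonpos b h) hc.2)]
          rw [hhead, Bool.true_and, if_neg h,
            if_neg (fun hc => absurd (hc.1.symm.trans hc.2) (by decide)), pvCheckLoop_nil]

theorem interlockable_eq_core (a b : Int) :
    interlockable a b = pvCore a b (max (pvConvert a).length (pvConvert b).length) := by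
  rw [interlockable]
  simp only [pvConvertLoop_eq, List.append_nil]
  by_cases h1 : (pvConvert b).length > (pvConvert a).length
  · rw [if_pos h1, if_neg (show ¬((pvConvert a).length > (pvConvert b).length) by omega)]
    have hlen : (List.replicate ((pvConvert b).length - (pvConvert a).length) '0' ++
        pvConvert a).length = (pvConvert b).length := by
      rw [List.length_append, List.length_replicate]; omega
    rw [hlen, pvCore, pvPad, pvPad, Nat.max_eq_right (by omega), Nat.sub_self,
      List.replicate_zero, List.nil_append]
  · by_cases h2 : (pvConvert a).length > (pvConvert b).length
    · rw [if_neg h1, if_pos h2, pvCore, pvPad, pvPad, Nat.max_eq_left (by omega),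
        Nat.sub_self, List.replicate_zero, List.nil_append]
    · have he : (pvConvert a).length = (pvConvert b).length := by omega
      rw [if_neg h1, if_neg h2, pvCore, pvPad, pvPad, he, Nat.max_self, Nat.sub_self,
        List.replicate_zero, List.nil_append, List.nil_append]

-- ===== VERDICT (by name: the statement is the Claim_ definition above) =====
theorem interlockable_spec : Claim_equal_interlockable := by
  intro a b _
  unfold Spec_interlockable interlockable_alt
  rw [interlockable_eq_core, pvCore_eq _ a b rfl]
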